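-- pv_equiv track=rewrite | github.com/jmanhype/MemesPy | src/dspy_meme_gen/agents/appropriateness.py | _determine_rating
-- ===== SOURCE A (Python) =====
-- from typing import Dict, Any, TypedDict, Optional, List
--
-- class ContentFlag(TypedDict):
--     """Type definition for content flags."""
--
--     category: str
--     severity: str  # "low", "medium", "high"
--     description: str
--     affected_elements: List[str]
--     suggestion: Optional[str]
--
-- def _determine_rating(flags: List[ContentFlag]) -> str:
--     """
--     Determine overall content rating based on flags.
--
--     Args:
--         flags: List of content flags
--
--     Returns:
--         Rating string
--     """
--     if not flags:
--         return "safe"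
--
--     # Check for high severity flags
--     has_high = any(flag["severity"] == "high" for flag in flags)
--     has_medium = any(flag["severity"] == "medium" for flag in flags)
--
--     if has_high:
--         return "inappropriate"
--     elif has_medium:
--         return "questionable"
--     else:
--         return "safe"
-- ===== SOURCE B (Python) =====
-- _PRIORITY = {"high": 2, "medium": 1}
-- _RATINGS = ("safe", "questionable", "inappropriate")
--
-- def _determine_rating(flags):
--     level = max((_PRIORITY.get(flag["severity"], 0) for flag in flags), default=0)
--     return _RATINGS[level]
-- ===== Notes on version B (the rewrite author's own statement) =====
-- stated objective: simpler
-- what changed: Replaces the empty-list guard plus two any() scans and an if/elif chain with a single max-reduction over a severity->priority map followed by one table lookup.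
import Mathlib
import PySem

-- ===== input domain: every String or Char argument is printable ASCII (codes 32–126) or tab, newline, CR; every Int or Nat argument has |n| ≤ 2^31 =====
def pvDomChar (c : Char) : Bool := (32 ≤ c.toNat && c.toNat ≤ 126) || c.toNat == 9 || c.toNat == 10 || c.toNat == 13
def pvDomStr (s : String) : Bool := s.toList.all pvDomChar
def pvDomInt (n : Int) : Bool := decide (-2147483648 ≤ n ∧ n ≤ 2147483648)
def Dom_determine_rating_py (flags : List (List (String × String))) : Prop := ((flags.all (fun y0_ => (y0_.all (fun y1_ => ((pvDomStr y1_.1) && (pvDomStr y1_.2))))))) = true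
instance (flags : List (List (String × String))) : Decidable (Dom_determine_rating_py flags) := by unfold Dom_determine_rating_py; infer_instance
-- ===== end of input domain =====

-- B replaces the empty guard + two any() scans + if/elif chain by one max-reduction over a
-- severity→priority map and a table lookup (objective: simpler decomposition, same O(n) cost).

-- flag["severity"]: total form via getD; Pre_ guarantees the key is present (else Python raises KeyError)
def pySeverity (flag : List (String × String)) : String :=
  ((PySem.Dict.ofList flag).get? "severity").getD ""

-- ===== PORT A =====
def determine_rating_py (flags : List (List (String × String))) : String :=
  if flags.isEmpty then "safe"
  else
    let has_high := flags.any (fun flag => pySeverity flag == "high")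
    let has_medium := flags.any (fun flag => pySeverity flag == "medium")
    if has_high then "inappropriate"
    else if has_medium then "questionable"
    else "safe"

-- ===== PORT B =====
def pvPriority : PySem.Dict String Int := PySem.Dict.ofList [("high", 2), ("medium", 1)]
def pvRatings : List String := ["safe", "questionable", "inappropriate"]

def determine_rating_py_alt (flags : List (List (String × String))) : String :=
  let level := PySem.List.maxD (flags.map (fun flag => pvPriority.getD (pySeverity flag) 0)) (fun x => x) 0
  PySem.List.pyGetD pvRatings level ""

-- ===== PRECONDITION & SPEC =====
-- Pre_ excludes flags in which some dict has no "severity" key: Python A raises KeyError there.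
def Pre_determine_rating_py (flags : List (List (String × String))) : Prop :=
  ∀ flag ∈ flags, "severity" ∈ flag.map Prod.fst

instance (flags : List (List (String × String))) : Decidable (Pre_determine_rating_py flags) := by
  unfold Pre_determine_rating_py; infer_instance

def pvWitness_determine_rating_py : (List (List (String × String))) :=
  [[("severity", "medium"), ("category", "x")]]

def Spec_determine_rating_py (flags : List (List (String × String))) (out : String) : Prop := out = determine_rating_py_alt flags
instance (flags : List (List (String × String))) (out : String) : Decidable (Spec_determine_rating_py flags out) := by unfold Spec_determine_rating_py; infer_instance

-- ===== CLAIM (what is proved, stated in full; the proofs are below) =====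
def Claim_equal_determine_rating_py : Prop := ∀ (flags : List (List (String × String))), Dom_determine_rating_py flags → Pre_determine_rating_py flags → Spec_determine_rating_py flags (determine_rating_py flags)

-- ===== LEMMAS AND PROOFS =====

-- the priority B reads for one flag
def pvPrio (flag : List (String × String)) : Int := pvPriority.getD (pySeverity flag) 0

lemma pvPrio_eq (flag : List (String × String)) :
    pvPrio flag = if pySeverity flag = "high" then 2
                  else if pySeverity flag = "medium" then 1 else 0 := by
  have h : pvPriority = PySem.Dict.mk [("high", 2), ("medium", 1)] := by decide
  simp only [pvPrio, h, PySem.Dict.getD, PySem.Dict.get?_mk_cons]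
  by_cases h1 : pySeverity flag = "high"
  · simp [h1]
  · by_cases h2 : pySeverity flag = "medium"
    · simp [h2]
    · simp [beq_iff_eq, Ne.symm h1, Ne.symm h2, h1, h2, PySem.Dict.get?]

-- A's verdict as an integer level
def pvLevel (flags : List (List (String × String))) : Int :=
  if flags.any (fun flag => pySeverity flag == "high") then 2
  else if flags.any (fun flag => pySeverity flag == "medium") then 1 else 0

lemma pvLevel_nonneg (flags : List (List (String × String))) : 0 ≤ pvLevel flags := by
  unfold pvLevel; split_ifs <;> omega

lemma pvLevel_cons (f : List (String × String)) (fs : List (List (String × String))) :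
    max (pvPrio f) (pvLevel fs) = pvLevel (f :: fs) := by
  rw [pvPrio_eq]
  simp only [pvLevel, List.any_cons, Bool.or_eq_true, beq_iff_eq]
  split_ifs <;> first | omega | tauto

lemma pvPrio_nonneg (f : List (String × String)) : 0 ≤ pvPrio f := by
  rw [pvPrio_eq]; split_ifs <;> omega

lemma foldl_max_eq (flags : List (List (String × String))) :
    ∀ m : Int, 0 ≤ m → List.foldl max m (flags.map pvPrio) = max m (pvLevel flags) := by
  induction flags with
  | nil =>
    intro m hm
    have h0 : pvLevel ([] : List (List (String × String))) = 0 := rfl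
    simp only [List.map_nil, List.foldl_nil, h0]
    omega
  | cons f fs ih =>
    intro m hm
    rw [List.map_cons, List.foldl_cons, ih (max m (pvPrio f)) (le_max_of_le_left hm),
        ← pvLevel_cons, max_assoc]

lemma max?_int_eq_foldl (l : List Int) :
    ∀ m : Int, PySem.List.max? (m :: l) (fun x => x) = some (List.foldl max m l) := by
  induction l with
  | nil => intro m; rfl
  | cons x xs ih =>
    intro m
    have : PySem.List.max? (m :: x :: xs) (fun y => y) = PySem.List.max? (max m x :: xs) (fun y => y) := by
      simp only [PySem.List.max?, List.foldl_cons]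
      congr 1
      by_cases h : m < x <;> simp [h, max_def] <;> omega
    rw [this, ih]
    simp

lemma alt_level (flags : List (List (String × String))) :
    determine_rating_py_alt flags = PySem.List.pyGetD pvRatings (max 0 (pvLevel flags)) "" := by
  unfold determine_rating_py_alt PySem.List.maxD
  have : (flags.map fun flag => pvPriority.getD (pySeverity flag) 0) = flags.map pvPrio := rfl
  rw [this]
  cases flags with
  | nil => simp [PySem.List.max?, pvLevel]
  | cons f fs =>
    rw [List.map_cons, max?_int_eq_foldl, foldl_max_eq fs (pvPrio f) (pvPrio_nonneg f),
        pvLevel_cons, Option.getD_some, max_eq_right (pvLevel_nonneg _)]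

-- ===== VERDICT (by name: the statement is the Claim_ definition above) =====
theorem determine_rating_py_spec : Claim_equal_determine_rating_py := by
  intro flags _ _
  unfold Spec_determine_rating_py
  rw [alt_level]
  cases flags with
  | nil => decide
  | cons f fs =>
    by_cases h1 : (f :: fs).any (fun flag => pySeverity flag == "high")
    · have hl : pvLevel (f :: fs) = 2 := by simp [pvLevel, h1]
      rw [hl]; simp [determine_rating_py, h1]; decide
    · by_cases h2 : (f :: fs).any (fun flag => pySeverity flag == "medium")
      · have hl : pvLevel (f :: fs) = 1 := by simp [pvLevel, h1, h2]
        rw [hl]; simp [determine_rating_py, h1, h2]; decide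
      · have hl : pvLevel (f :: fs) = 0 := by simp [pvLevel, h1, h2]
        rw [hl]; simp [determine_rating_py, h1, h2]; decide
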